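-- pv_equiv track=rewrite | github.com/zhuhongd/Technical-Interview-Prepare | week2 (Two Pointers)/6. [Medium] 4Sum.py | _valid_four_sum_answer
-- ===== SOURCE A (Python) =====
-- from typing import List
-- from typing import List, Tuple
-- from collections import Counter
--
-- def _normalize(quads: List[List[int]]) -> List[Tuple[int, int, int, int]]:
--     """
--     Canonical, order-insensitive representation:
--       - sort each quadruplet internally
--       - convert to tuple
--       - sort the outer list of tuples
--     """
--     return sorted(tuple(sorted(q)) for q in quads)
--
-- def _valid_four_sum_answer(nums: List[int], target: int, quads: List[List[int]]) -> bool: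
--     """
--     Property-based validator for 4Sum outputs:
--       1) Each quadruplet has length 4 and sums to target
--       2) No duplicate quadruplets (value-wise)
--       3) Multiplicity check: each quadruplet's values are available from nums
--          with enough counts (prevents fabricated values).
--     """
--     # 1) shape + sum
--     for q in quads:
--         if not isinstance(q, (list, tuple)) or len(q) != 4:
--             return False
--         if sum(q) != target:
--             return False
--
--     # 2) deduplicate (value-wise)
--     norm = _normalize(quads)
--     if len(norm) != len(set(norm)):
--         return False
--
--     # 3) multiplicity check against nums
--     nums_count = Counter(nums)
--     for q in norm:
--         need = Counter(q)
--         for v, cnt in need.items():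
--             if nums_count[v] < cnt:
--                 return False
--     return True
-- ===== SOURCE B (Python) =====
-- from collections import Counter
-- from typing import List
--
--
-- def _valid_four_sum_answer(nums: List[int], target: int, quads: List[List[int]]) -> bool:
--     """Single-pass validator: Counter(nums) built once, then one loop over quads
--     doing shape/sum check, dedup via a `seen` set of sorted tuples, and the
--     multiplicity check inline."""
--     nums_count = Counter(nums)
--     seen = set()
--     for q in quads:
--         if not isinstance(q, (list, tuple)) or len(q) != 4:
--             return False
--         if sum(q) != target:
--             return False
--         key = tuple(sorted(q))
--         if key in seen:
--             return False
--         seen.add(key)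
--         for v, cnt in Counter(q).items():
--             if nums_count[v] < cnt:
--                 return False
--     return True
-- ===== Notes on version B (the rewrite author's own statement) =====
-- stated objective: alternative
-- what changed: Fused A's three separate passes (shape/sum loop, sort-normalize plus set-size dedup, multiplicity loop over the sorted list) into one traversal of quads maintaining an incremental `seen` set of sorted-tuple keys with the multiplicity check inline; no outer sort.
import Mathlib
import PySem

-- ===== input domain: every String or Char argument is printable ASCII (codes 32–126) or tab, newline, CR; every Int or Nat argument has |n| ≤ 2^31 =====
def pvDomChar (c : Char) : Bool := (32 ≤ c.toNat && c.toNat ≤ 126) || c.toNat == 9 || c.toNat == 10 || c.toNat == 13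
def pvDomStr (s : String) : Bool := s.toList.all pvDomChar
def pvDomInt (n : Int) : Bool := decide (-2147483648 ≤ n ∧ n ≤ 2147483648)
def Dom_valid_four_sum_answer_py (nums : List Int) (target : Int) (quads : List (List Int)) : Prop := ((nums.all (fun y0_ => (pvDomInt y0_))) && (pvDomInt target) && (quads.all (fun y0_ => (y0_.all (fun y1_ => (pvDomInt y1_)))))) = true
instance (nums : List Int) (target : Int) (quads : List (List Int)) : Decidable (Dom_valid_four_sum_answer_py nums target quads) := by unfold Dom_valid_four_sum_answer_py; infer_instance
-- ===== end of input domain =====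

-- B fuses A's three passes (shape/sum loop, sort-normalize + set-size dedup, multiplicity loop)
-- into a single traversal with an incremental `seen` set; return values are proved equal everywhere.

-- ===== PORT A =====
-- loop 1: shape + sum (early return False)
def aShapeLoop (target : Int) : List (List Int) → Bool
  | [] => true
  | q :: rest =>
    if q.length ≠ 4 then false
    else if q.sum ≠ target then false
    else aShapeLoop target rest

-- _normalize: sorted(tuple(sorted(q)) for q in quads)
def aNormalize (quads : List (List Int)) : List (List Int) :=
  PySem.List.sorted (quads.map (fun q => PySem.List.sorted q (fun x => x) false)) (fun x => x) false

-- loop 3: per-quad Counter vs nums_count (inner 'for v, cnt in need.items()' as .any, early return)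
def aMultLoop (numsCount : PySem.Dict Int Int) : List (List Int) → Bool
  | [] => true
  | q :: rest =>
    if ((PySem.Dict.counter q).items).any (fun p => decide (PySem.Dict.getD numsCount p.1 0 < p.2)) then false
    else aMultLoop numsCount rest

def valid_four_sum_answer_py (nums : List Int) (target : Int) (quads : List (List Int)) : Bool :=
  if aShapeLoop target quads then
    let norm := aNormalize quads
    if norm.length ≠ (PySem.Set.ofList norm).length then false
    else aMultLoop (PySem.Dict.counter nums) norm
  else false

-- ===== PORT B =====
-- single pass: shape/sum, dedup via `seen`, multiplicity — all inline, early return False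
def bLoop (numsCount : PySem.Dict Int Int) (target : Int) (seen : PySem.Set (List Int)) : List (List Int) → Bool
  | [] => true
  | q :: rest =>
    if q.length ≠ 4 then false
    else if q.sum ≠ target then false
    else
      let key := PySem.List.sorted q (fun x => x) false
      if seen.contains key then false
      else
        let seen' := seen.add key
        if ((PySem.Dict.counter q).items).any (fun p => decide (PySem.Dict.getD numsCount p.1 0 < p.2)) then false
        else bLoop numsCount target seen' rest

def valid_four_sum_answer_py_alt (nums : List Int) (target : Int) (quads : List (List Int)) : Bool :=
  bLoop (PySem.Dict.counter nums) target PySem.Set.empty quads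

-- ===== PRECONDITION & SPEC =====
def Spec_valid_four_sum_answer_py (nums : List Int) (target : Int) (quads : List (List Int)) (out : Bool) : Prop := out = valid_four_sum_answer_py_alt nums target quads
instance (nums : List Int) (target : Int) (quads : List (List Int)) (out : Bool) : Decidable (Spec_valid_four_sum_answer_py nums target quads out) := by unfold Spec_valid_four_sum_answer_py; infer_instance

-- ===== CLAIM (what is proved, stated in full; the proofs are below) =====
def Claim_equal_valid_four_sum_answer_py : Prop := ∀ (nums : List Int) (target : Int) (quads : List (List Int)), Dom_valid_four_sum_answer_py nums target quads → Spec_valid_four_sum_answer_py nums target quads (valid_four_sum_answer_py nums target quads)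

-- ===== LEMMAS AND PROOFS =====

-- canonical key of a quadruplet
def keyOf (q : List Int) : List Int := PySem.List.sorted q (fun x => x) false

-- the shared per-quad multiplicity test
def badQ (numsCount : PySem.Dict Int Int) (q : List Int) : Bool :=
  ((PySem.Dict.counter q).items).any (fun p => decide (PySem.Dict.getD numsCount p.1 0 < p.2))

theorem badQ_iff (c : PySem.Dict Int Int) (q : List Int) :
    badQ c q = true ↔ ∃ v ∈ q, PySem.Dict.getD c v 0 < (q.count v : Int) := by
  simp [badQ, PySem.Dict.items_counter, List.any_map, List.any_eq_true,
    PySem.Set.mem_ofList, Function.comp]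

theorem badQ_keyOf (c : PySem.Dict Int Int) (q : List Int) : badQ c (keyOf q) = badQ c q := by
  have hperm : (keyOf q).Perm q := PySem.List.sorted_perm q (fun x => x) false
  apply Bool.eq_iff_iff.mpr
  rw [badQ_iff, badQ_iff]
  constructor <;> rintro ⟨v, hv, hlt⟩
  · exact ⟨v, hperm.mem_iff.mp hv, by rwa [hperm.count_eq] at hlt⟩
  · exact ⟨v, hperm.mem_iff.mpr hv, by rwa [hperm.count_eq]⟩

theorem aShapeLoop_iff (t : Int) (l : List (List Int)) :
    aShapeLoop t l = true ↔ ∀ q ∈ l, q.length = 4 ∧ q.sum = t := by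
  induction l with
  | nil => simp [aShapeLoop]
  | cons q rest ih =>
    by_cases h1 : q.length = 4 <;> by_cases h2 : q.sum = t <;>
      simp [aShapeLoop, h1, h2, ih]

theorem aMultLoop_iff (c : PySem.Dict Int Int) (l : List (List Int)) :
    aMultLoop c l = true ↔ ∀ q ∈ l, badQ c q = false := by
  induction l with
  | nil => simp [aMultLoop]
  | cons q rest ih =>
    have hstep : aMultLoop c (q :: rest) = if badQ c q then false else aMultLoop c rest := rfl
    rw [hstep]
    rcases Bool.eq_false_or_eq_true (badQ c q) with h | h
    · rw [if_pos h]
      simp [h]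
    · rw [if_neg (by simp [h])]
      rw [ih]
      simp [h]

-- set(l) has the same length as l exactly when l has no duplicates
theorem length_ofList_eq_iff {α : Type} [BEq α] [LawfulBEq α] (l : List α) :
    (PySem.Set.ofList l).length = l.length ↔ l.Nodup := by
  induction l with
  | nil => simp [PySem.Set.ofList, PySem.Set.empty]
  | cons x xs ih =>
    rw [PySem.Set.ofList_cons]
    by_cases hx : x ∈ xs
    · have hlt : ((PySem.Set.ofList xs).discard x).length < (PySem.Set.ofList xs).length := by
        apply List.length_filter_lt_length_iff_exists.mpr
        exact ⟨x, (PySem.Set.mem_ofList xs x).mpr hx, by simp⟩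
      have hle := PySem.Set.length_ofList_le xs
      simp only [List.length_cons, List.nodup_cons]
      constructor
      · intro h; omega
      · rintro ⟨hxx, _⟩; exact absurd hx hxx
    · have hfe : (PySem.Set.ofList xs).discard x = PySem.Set.ofList xs := by
        apply List.filter_eq_self.mpr
        intro a ha
        have ham : a ∈ xs := (PySem.Set.mem_ofList xs a).mp ha
        have : a ≠ x := fun he => hx (he ▸ ham)
        simp [this]
      rw [hfe]
      simp [List.nodup_cons, hx, ih]

theorem portA_iff (nums : List Int) (t : Int) (quads : List (List Int)) :
    valid_four_sum_answer_py nums t quads = true ↔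
      (∀ q ∈ quads, q.length = 4 ∧ q.sum = t) ∧
      (quads.map keyOf).Nodup ∧
      (∀ q ∈ quads, badQ (PySem.Dict.counter nums) q = false) := by
  have hperm : (aNormalize quads).Perm (quads.map keyOf) :=
    PySem.List.sorted_perm (quads.map keyOf) (fun x => x) false
  have hA : valid_four_sum_answer_py nums t quads =
      if aShapeLoop t quads then
        (if (aNormalize quads).length ≠ (PySem.Set.ofList (aNormalize quads)).length then false
         else aMultLoop (PySem.Dict.counter nums) (aNormalize quads))
      else false := rfl
  rw [hA]
  rcases Bool.eq_false_or_eq_true (aShapeLoop t quads) with hs | hs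
  · rw [if_pos hs]
    by_cases hd : (aNormalize quads).length = (PySem.Set.ofList (aNormalize quads)).length
    · have hnd : (quads.map keyOf).Nodup := hperm.nodup_iff.mp ((length_ofList_eq_iff _).mp hd.symm)
      rw [if_neg (by simpa using hd)]
      rw [aMultLoop_iff]
      constructor
      · intro hm
        refine ⟨(aShapeLoop_iff t quads).mp hs, hnd, fun q hq => ?_⟩
        have := hm (keyOf q) (hperm.mem_iff.mpr (List.mem_map_of_mem hq))
        rwa [badQ_keyOf] at this
      · rintro ⟨_, _, h3⟩ k hk
        have hk' : k ∈ quads.map keyOf := hperm.mem_iff.mp hk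
        rcases List.mem_map.mp hk' with ⟨q, hq, rfl⟩
        rw [badQ_keyOf]; exact h3 q hq
    · rw [if_pos (by simpa using hd)]
      simp only [Bool.false_eq_true, false_iff]
      rintro ⟨_, hnd, _⟩
      exact hd ((length_ofList_eq_iff _).mpr (hperm.nodup_iff.mpr hnd)).symm
  · rw [if_neg (by simp [hs])]
    simp only [Bool.false_eq_true, false_iff]
    rintro ⟨h1, _, _⟩
    rw [(aShapeLoop_iff t quads).mpr h1] at hs
    cases hs

theorem bLoop_iff (c : PySem.Dict Int Int) (t : Int) (seen : PySem.Set (List Int))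
    (l : List (List Int)) :
    bLoop c t seen l = true ↔
      (∀ q ∈ l, q.length = 4 ∧ q.sum = t) ∧
      (l.map keyOf).Nodup ∧
      (∀ q ∈ l, keyOf q ∉ seen) ∧
      (∀ q ∈ l, badQ c q = false) := by
  induction l generalizing seen with
  | nil => simp [bLoop]
  | cons q rest ih =>
    have hstep : bLoop c t seen (q :: rest) =
        (if q.length ≠ 4 then false
         else if q.sum ≠ t then false
         else if seen.contains (keyOf q) then false
         else if badQ c q then false
         else bLoop c t (seen.add (keyOf q)) rest) := rfl
    rw [hstep]
    by_cases h1 : q.length = 4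
    · rw [if_neg (by simp [h1])]
      by_cases h2 : q.sum = t
      · rw [if_neg (by simp [h2])]
        by_cases h3 : keyOf q ∈ seen
        · rw [if_pos ((PySem.Set.contains_iff seen (keyOf q)).mpr h3)]
          simp only [Bool.false_eq_true, false_iff]
          rintro ⟨_, _, hsn, _⟩
          exact hsn q List.mem_cons_self h3
        · rw [if_neg (fun h => h3 ((PySem.Set.contains_iff seen (keyOf q)).mp h))]
          rcases Bool.eq_false_or_eq_true (badQ c q) with hb | hb
          · rw [if_pos hb]
            simp only [Bool.false_eq_true, false_iff]
            rintro ⟨_, _, _, hbd⟩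
            have := hbd q List.mem_cons_self
            rw [hb] at this; cases this
          · rw [if_neg (by simp [hb])]
            rw [ih]
            simp only [List.forall_mem_cons, List.map_cons, List.nodup_cons]
            constructor
            · rintro ⟨hsh, hnd, hsn, hbd⟩
              refine ⟨⟨⟨h1, h2⟩, hsh⟩, ⟨?_, hnd⟩,
                ⟨h3, fun q' hq' hm => hsn q' hq' ((PySem.Set.mem_add _ _ _).mpr (Or.inl hm))⟩,
                hb, hbd⟩
              intro hmem
              rcases List.mem_map.mp hmem with ⟨q', hq', he⟩
              exact hsn q' hq' ((PySem.Set.mem_add _ _ _).mpr (Or.inr he))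
            · rintro ⟨⟨_, hsh⟩, ⟨hnm, hnd⟩, ⟨_, hsn⟩, _, hbd⟩
              refine ⟨hsh, hnd, ?_, hbd⟩
              intro q' hq' hm
              rcases (PySem.Set.mem_add _ _ _).mp hm with h | h
              · exact hsn q' hq' h
              · exact hnm (h ▸ List.mem_map_of_mem hq')
      · rw [if_pos h2]
        simp only [Bool.false_eq_true, false_iff]
        rintro ⟨hsh, _⟩
        exact h2 (hsh q List.mem_cons_self).2
    · rw [if_pos h1]
      simp only [Bool.false_eq_true, false_iff]
      rintro ⟨hsh, _⟩
      exact h1 (hsh q List.mem_cons_self).1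

theorem portB_iff (nums : List Int) (t : Int) (quads : List (List Int)) :
    valid_four_sum_answer_py_alt nums t quads = true ↔
      (∀ q ∈ quads, q.length = 4 ∧ q.sum = t) ∧
      (quads.map keyOf).Nodup ∧
      (∀ q ∈ quads, badQ (PySem.Dict.counter nums) q = false) := by
  unfold valid_four_sum_answer_py_alt
  rw [bLoop_iff]
  simp [PySem.Set.empty]

-- ===== VERDICT (by name: the statement is the Claim_ definition above) =====
theorem valid_four_sum_answer_py_spec : Claim_equal_valid_four_sum_answer_py := by
  intro nums target quads _
  unfold Spec_valid_four_sum_answer_py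
  apply Bool.eq_iff_iff.mpr
  rw [portA_iff, portB_iff]
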